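-- pv_equiv track=rewrite | github.com/MrBrantCode/unitest_baseline | mut_generate/mist_train_taco/taco_17631/solution.py | can_transform_array
-- ===== SOURCE A (Python) =====
-- from collections import defaultdict
--
-- def can_transform_array(a, b):
--     def merge_sort(order, a):
--         if len(order) == 1:
--             return (order, a)
--         mid = (len(order) + 1) // 2
--         (left_o, left_a) = merge_sort(order[:mid], a[:mid])
--         (right_o, right_a) = merge_sort(order[mid:], a[mid:])
--         l_mins = []
--         cur_min = 10 ** 6
--         for i in range(mid - 1, -1, -1):
--             cur_min = min(cur_min, left_a[i])
--             l_mins.append(cur_min)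
--         l_mins.reverse()
--         l_idx = 0
--         r_idx = 0
--         o_ans = []
--         a_ans = []
--         while l_idx < mid and r_idx < len(order) - mid:
--             if left_o[l_idx] < right_o[r_idx]:
--                 o_ans.append(left_o[l_idx])
--                 a_ans.append(left_a[l_idx])
--                 l_idx += 1
--             else:
--                 if right_a[r_idx] > l_mins[l_idx]:
--                     raise Exception
--                 o_ans.append(right_o[r_idx])
--                 a_ans.append(right_a[r_idx])
--                 r_idx += 1
--         while l_idx < mid:
--             o_ans.append(left_o[l_idx])
--             a_ans.append(left_a[l_idx])
--             l_idx += 1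
--         while r_idx < len(order) - mid:
--             o_ans.append(right_o[r_idx])
--             a_ans.append(right_a[r_idx])
--             r_idx += 1
--         return (o_ans, a_ans)
--
--     n = len(a)
--     order = [0] * n
--     occurrences = defaultdict(list)
--     for (i, num) in enumerate(b):
--         occurrences[num].append(i)
--     for i in range(n - 1, -1, -1):
--         x = a[i]
--         if len(occurrences[x]) == 0:
--             return False
--         order[i] = occurrences[x].pop()
--     try:
--         merge_sort(order, a)
--         return True
--     except:
--         return False
-- ===== SOURCE B (Python) =====
-- from collections import defaultdict
--
-- def can_transform_array(a, b):
--     n = len(a)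
--     order = [0] * n
--     occurrences = defaultdict(list)
--     for (i, num) in enumerate(b):
--         occurrences[num].append(i)
--     for i in range(n - 1, -1, -1):
--         x = a[i]
--         if len(occurrences[x]) == 0:
--             return False
--         order[i] = occurrences[x].pop()
--     # accept iff no pair lands out of order while the values force an order:
--     # target positions may never invert when a[i] < a[j]
--     for j in range(n):
--         for i in range(j):
--             if order[i] >= order[j] and a[i] < a[j]:
--                 return False
--     return True
-- ===== Notes on version B (the rewrite author's own statement) =====
-- stated objective: simpler
-- what changed: The raise-on-inversion divide-and-conquer merge sort (with suffix-minimum arrays) is replaced by a direct pairwise scan of the matched target positions: reject iff some pair i<j has order[i] >= order[j] while a[i] < a[j]; the greedy position-matching loop is kept.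
-- intended difference: On empty a, A's merge_sort recurses without a base case and the caught RecursionError makes A return False, although an empty array is trivially transformable; B returns True, the intended value. — e.g. on can_transform_array([], []): A returns false, B returns true
-- outside the precondition, e.g. on can_transform_array([2000000, 1500000], [1500000, 2000000]): A returns False, B returns True
import Mathlib
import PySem

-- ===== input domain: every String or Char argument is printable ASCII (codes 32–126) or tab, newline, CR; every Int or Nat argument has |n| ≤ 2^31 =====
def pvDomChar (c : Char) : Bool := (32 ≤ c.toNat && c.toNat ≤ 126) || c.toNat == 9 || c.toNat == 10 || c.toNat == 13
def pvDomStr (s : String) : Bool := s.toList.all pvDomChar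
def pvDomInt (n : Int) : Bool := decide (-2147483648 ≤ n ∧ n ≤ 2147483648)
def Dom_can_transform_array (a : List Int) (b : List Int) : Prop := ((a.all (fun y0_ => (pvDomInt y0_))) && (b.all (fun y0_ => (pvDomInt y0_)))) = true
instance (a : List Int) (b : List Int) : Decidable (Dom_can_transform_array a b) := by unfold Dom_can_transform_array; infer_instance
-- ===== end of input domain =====

-- B replaces A's raise-on-inversion merge sort by a direct O(n^2) pairwise scan of the matched
-- target positions (objective: simpler); the greedy position-matching loop is the same in both.

-- ===== PORT A =====

-- occurrences = defaultdict(list); for (i, num) in enumerate(b): occurrences[num].append(i)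
-- (shared by both ports: the matching phase is textually identical in A and in B)
def ctaOcc (b : List Int) : PySem.Dict Int (List Int) :=
  (PySem.List.enumerate b 0).foldl (fun d p => d.modify p.2 [] (fun l => l ++ [p.1])) PySem.Dict.empty

-- for i in range(n-1,-1,-1): x = a[i]; if len(occurrences[x]) == 0: return False; order[i] = occurrences[x].pop()
-- counted down by i+1 ↦ i; .pop() yields the last element (exact: the list is non-empty in that branch)
-- and leaves dropLast; the defaultdict's insertion of [] on a missing key is value-invisible (getD x [] is [] either way)
def ctaMatch (a : List Int) : Nat → List Int → PySem.Dict Int (List Int) → Option (List Int)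
  | 0, order, _ => some order
  | i+1, order, occ =>
    let x := PySem.List.pyGetD a (i : Int) 0
    let lst := occ.getD x []
    if lst.length = 0 then none
    else ctaMatch a i (PySem.List.pySetD order (i : Int) (PySem.List.pyGetD lst (-1) 0))
           (occ.insert x lst.dropLast)

-- l_mins = []; cur_min = 10**6; for i in range(mid-1,-1,-1): cur_min = min(cur_min, left_a[i]); l_mins.append(cur_min); l_mins.reverse()
def ctaLmins (la : List Int) : Nat → Int → List Int → List Int
  | 0, _, acc => acc.reverse
  | i+1, cur, acc =>
    let c := min cur (PySem.List.pyGetD la (i : Int) 0)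
    ctaLmins la i c (acc ++ [c])

-- while idx < bound: ans.append(xs[idx]); idx += 1   (the two tail-copy whiles of the merge)
def ctaTail (xs : List Int) (idx bound : Nat) (acc : List Int) : List Int :=
  if _h : idx < bound then ctaTail xs (idx + 1) bound (acc ++ [PySem.List.pyGetD xs (idx : Int) 0]) else acc
termination_by bound - idx

-- the main merge while-loop; none = the 'raise Exception'
def ctaMerge (lo la ro ra lmins : List Int) (mid rlen : Nat) (l r : Nat) (oans aans : List Int) :
    Option (List Int × List Int) :=
  if _h : l < mid ∧ r < rlen then
    if PySem.List.pyGetD lo (l : Int) 0 < PySem.List.pyGetD ro (r : Int) 0 then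
      ctaMerge lo la ro ra lmins mid rlen (l+1) r
        (oans ++ [PySem.List.pyGetD lo (l : Int) 0]) (aans ++ [PySem.List.pyGetD la (l : Int) 0])
    else if PySem.List.pyGetD ra (r : Int) 0 > PySem.List.pyGetD lmins (l : Int) 0 then none
    else ctaMerge lo la ro ra lmins mid rlen l (r+1)
        (oans ++ [PySem.List.pyGetD ro (r : Int) 0]) (aans ++ [PySem.List.pyGetD ra (r : Int) 0])
  else
    some (ctaTail ro r rlen (ctaTail lo l mid oans), ctaTail ra r rlen (ctaTail la l mid aans))
termination_by (mid - l) + (rlen - r)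

-- merge_sort; the fuel models Python's recursion limit (the bare 'except' catches the RecursionError
-- that the empty input runs into; for non-empty input the depth never reaches len+1);
-- order[:mid] with 0 ≤ mid ≤ len is take mid and order[mid:] is drop mid (exact)
def ctaMsort : Nat → List Int → List Int → Option (List Int × List Int)
  | 0, _, _ => none
  | fuel+1, order, a =>
    if order.length = 1 then some (order, a)
    else
      let mid := (order.length + 1) / 2
      match ctaMsort fuel (order.take mid) (a.take mid) with
      | none => none
      | some (lo, la) =>
        match ctaMsort fuel (order.drop mid) (a.drop mid) with
        | none => none
        | some (ro, ra) =>
          ctaMerge lo la ro ra (ctaLmins la mid (10^6) []) mid (order.length - mid) 0 0 [] []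

def can_transform_array (a : List Int) (b : List Int) : Bool :=
  let n := a.length
  match ctaMatch a n (List.replicate n 0) (ctaOcc b) with
  | none => false
  | some order =>
    match ctaMsort (n + 1) order a with
    | none => false
    | some _ => true

-- ===== PORT B =====

-- same matching phase, then: for j in range(n): for i in range(j):
--   if order[i] >= order[j] and a[i] < a[j]: return False
-- return True
def can_transform_array_alt (a : List Int) (b : List Int) : Bool :=
  let n := a.length
  match ctaMatch a n (List.replicate n 0) (ctaOcc b) with
  | none => false
  | some order =>
    (PySem.List.pyRange 0 (n : Int) 1).all (fun j =>
      (PySem.List.pyRange 0 j 1).all (fun i =>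
        !(decide (PySem.List.pyGetD order i 0 ≥ PySem.List.pyGetD order j 0) &&
          decide (PySem.List.pyGetD a i 0 < PySem.List.pyGetD a j 0))))

-- ===== PRECONDITION & SPEC =====

-- Pre_ restricts the elements of a to the value bound 10**6 that A's sentinel 'cur_min = 10**6'
-- assumes (the original task's bound): above it the sentinel clamps A's running minimum and A's
-- verdict is an artefact of the sentinel, not the inversion test it implements below the bound.
def Pre_can_transform_array (a : List Int) (b : List Int) : Prop := ∀ x ∈ a, x ≤ 1000000
instance (a : List Int) (b : List Int) : Decidable (Pre_can_transform_array a b) := by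
  unfold Pre_can_transform_array; infer_instance
def pvWitness_can_transform_array : List Int × List Int := ([3, 1, 2], [1, 2, 3])

-- On empty a, A's merge_sort recurses without a base case and the caught RecursionError makes A
-- return False, although the empty array is trivially transformable; B returns True, the intended value.
def D_can_transform_array (a : List Int) (b : List Int) : Prop := a = []
instance (a : List Int) (b : List Int) : Decidable (D_can_transform_array a b) := by
  unfold D_can_transform_array; infer_instance

def Spec_can_transform_array (a : List Int) (b : List Int) (out : Bool) : Prop :=
  ¬ D_can_transform_array a b → out = can_transform_array_alt a b
instance (a : List Int) (b : List Int) (out : Bool) : Decidable (Spec_can_transform_array a b out) := by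
  unfold Spec_can_transform_array; infer_instance

def pvDiffWitness_can_transform_array : List Int × List Int := ([], [])
def pvDiffWitnessOut_can_transform_array : Bool × Bool := (false, true)

-- ===== CLAIM (what is proved, stated in full; the proofs are below) =====
def Claim_unchanged_can_transform_array : Prop := ∀ (a : List Int) (b : List Int), Dom_can_transform_array a b → Pre_can_transform_array a b → Spec_can_transform_array a b (can_transform_array a b)
def Claim_changed_can_transform_array : Prop := Dom_can_transform_array (pvDiffWitness_can_transform_array.1) (pvDiffWitness_can_transform_array.2) ∧ Pre_can_transform_array (pvDiffWitness_can_transform_array.1) (pvDiffWitness_can_transform_array.2) ∧ D_can_transform_array (pvDiffWitness_can_transform_array.1) (pvDiffWitness_can_transform_array.2) ∧ can_transform_array (pvDiffWitness_can_transform_array.1) (pvDiffWitness_can_transform_array.2) = pvDiffWitnessOut_can_transform_array.1 ∧ can_transform_array_alt (pvDiffWitness_can_transform_array.1) (pvDiffWitness_can_transform_array.2) = pvDiffWitnessOut_can_transform_array.2 ∧ pvDiffWitnessOut_can_transform_array.1 ≠ pvDiffWitnessOut_can_transform_array.2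
def Claim_exact_can_transform_array : Prop := ∀ (a : List Int) (b : List Int), Dom_can_transform_array a b → Pre_can_transform_array a b → D_can_transform_array a b → can_transform_array a b ≠ can_transform_array_alt a b

-- ===== LEMMAS AND PROOFS =====

-- a "violation": pair p before pair q (each pair = (target position, value)) with positions
-- not increasing while the values force them to
def pvGood (z : List (Int × Int)) : Prop := z.Pairwise (fun p q => ¬(q.1 ≤ p.1 ∧ p.2 < q.2))

-- suffix minimum with A's sentinel
def pvSM (L : List Int) : Int := L.foldr min (10^6)

-- non-accumulator skeleton of A's merge loop
def pvMerge : List (Int × Int) → List (Int × Int) → Option (List (Int × Int))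
  | [], R => some R
  | p :: L, [] => some (p :: L)
  | p :: L, q :: R =>
    if p.1 < q.1 then (pvMerge L (q :: R)).map (p :: ·)
    else if pvSM ((p :: L).map (·.2)) < q.2 then none
    else (pvMerge (p :: L) R).map (q :: ·)

theorem pvSM_le_mem (L : List Int) : ∀ x ∈ L, pvSM L ≤ x := by
  induction L with
  | nil => simp
  | cons y t ih =>
    intro x hx
    rcases List.mem_cons.1 hx with rfl | hx
    · exact min_le_left _ _
    · exact le_trans (min_le_right _ _) (ih x hx)

theorem pvSM_mem_or (L : List Int) : pvSM L ∈ L ∨ pvSM L = 10^6 := by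
  induction L with
  | nil => right; rfl
  | cons y t ih =>
    rcases le_total y (pvSM t) with h | h
    · left
      have : pvSM (y :: t) = y := min_eq_left h
      rw [this]; exact List.mem_cons_self
    · have : pvSM (y :: t) = pvSM t := min_eq_right h
      rw [this]
      rcases ih with hm | he
      · left; exact List.mem_cons_of_mem _ hm
      · right; exact he

theorem pvSM_lt_iff (L : List Int) (v : Int) (hL : ∀ x ∈ L, x ≤ 10^6) (hne : L ≠ []) :
    pvSM L < v ↔ ∃ x ∈ L, x < v := by
  constructor
  · intro h
    rcases pvSM_mem_or L with hm | he
    · exact ⟨_, hm, h⟩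
    · rcases List.exists_mem_of_ne_nil L hne with ⟨x, hx⟩
      exact ⟨x, hx, lt_of_le_of_lt (he ▸ hL x hx) h⟩
  · rintro ⟨x, hx, hxv⟩
    exact lt_of_le_of_lt (pvSM_le_mem L x hx) hxv

theorem ctaLmins_eq (la : List Int) :
    ∀ i, i ≤ la.length → ∀ acc, ctaLmins la i (pvSM (la.drop i)) acc
      = (List.range i).map (fun k => pvSM (la.drop k)) ++ acc.reverse := by
  intro i
  induction i with
  | zero => intro _ acc; simp [ctaLmins]
  | succ j ih =>
    intro hj acc
    have hjl : j < la.length := by omega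
    have hget : PySem.List.pyGetD la (j : Int) 0 = la[j] := by
      simp [PySem.List.pyGetD_natCast, List.getD_eq_getElem?_getD, List.getElem?_eq_getElem hjl]
    have hdrop : la.drop j = la[j] :: la.drop (j+1) := List.drop_eq_getElem_cons hjl
    have hc : min (pvSM (la.drop (j+1))) (PySem.List.pyGetD la (j : Int) 0) = pvSM (la.drop j) := by
      rw [hget, hdrop]; simp [pvSM, List.foldr]; rw [min_comm]
    show ctaLmins la j _ _ = _
    rw [hc, ih (by omega)]
    simp [List.range_succ]

theorem pvZipDrop (n : Nat) : ∀ (xs ys : List Int), (xs.zip ys).drop n = (xs.drop n).zip (ys.drop n) := by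
  induction n with
  | zero => intro xs ys; simp
  | succ m ih =>
    intro xs ys
    cases xs with
    | nil => simp
    | cons x xs =>
      cases ys with
      | nil => simp
      | cons y ys => simpa using ih xs ys

theorem ctaTail_eq' (xs : List Int) :
    ∀ n idx acc, xs.length - idx = n → ctaTail xs idx xs.length acc = acc ++ xs.drop idx := by
  intro n
  induction n with
  | zero =>
    intro idx acc h
    rw [ctaTail]
    simp only [dif_neg (by omega : ¬ idx < xs.length)]
    rw [List.drop_of_length_le (by omega)]; simp
  | succ m ih =>
    intro idx acc h
    have hlt : idx < xs.length := by omega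
    rw [ctaTail]
    simp only [dif_pos hlt]
    rw [ih (idx+1) _ (by omega)]
    have : PySem.List.pyGetD xs (idx : Int) 0 = xs[idx] := by
      simp [PySem.List.pyGetD_natCast, List.getD_eq_getElem?_getD, List.getElem?_eq_getElem hlt]
    rw [this, List.drop_eq_getElem_cons hlt]
    simp

theorem pvMerge_nil_right (L : List (Int × Int)) : pvMerge L [] = some L := by
  cases L <;> simp [pvMerge]

theorem pyGetD_idx (xs : List Int) (k : Nat) (h : k < xs.length) :
    PySem.List.pyGetD xs (k : Int) 0 = xs[k] := by
  simp [PySem.List.pyGetD_natCast, List.getD_eq_getElem?_getD, List.getElem?_eq_getElem h]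

theorem ctaMerge_eq (lo la ro ra lmins : List Int) (mid rlen : Nat)
    (hlo : lo.length = mid) (hla : la.length = mid) (hro : ro.length = rlen) (hra : ra.length = rlen)
    (hlm : lmins = (List.range mid).map (fun k => pvSM (la.drop k))) :
    ∀ n l r oans aans, (mid - l) + (rlen - r) = n →
      ctaMerge lo la ro ra lmins mid rlen l r oans aans
      = (pvMerge ((lo.zip la).drop l) ((ro.zip ra).drop r)).map
          (fun w => (oans ++ w.map (·.1), aans ++ w.map (·.2))) := by
  subst hlo hro
  intro n
  induction n with
  | zero =>
    intro l r oans aans h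
    have hl : lo.length ≤ l := by omega
    have hr : ro.length ≤ r := by omega
    rw [ctaMerge]
    simp only [dif_neg (by omega : ¬ (l < lo.length ∧ r < ro.length))]
    have hzl : (lo.zip la).drop l = [] := by
      rw [List.drop_eq_nil_iff]; simp [List.length_zip]; omega
    have hzr : (ro.zip ra).drop r = [] := by
      rw [List.drop_eq_nil_iff]; simp [List.length_zip]; omega
    rw [hzl, hzr]
    simp only [pvMerge, Option.map_some]
    rw [ctaTail_eq' lo _ l _ rfl, List.drop_of_length_le hl, List.append_nil,
        ctaTail_eq' ro _ r _ rfl, List.drop_of_length_le hr]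
    conv_lhs => rw [← hla, ctaTail_eq' la _ l _ rfl, List.drop_of_length_le (by omega), List.append_nil,
        ← hra, ctaTail_eq' ra _ r _ rfl, List.drop_of_length_le (by omega)]
    simp
  | succ m ih =>
    intro l r oans aans h
    by_cases hc : l < lo.length ∧ r < ro.length
    case neg =>
      rw [ctaMerge]
      simp only [dif_neg hc]
      rw [ctaTail_eq' lo _ l _ rfl, ctaTail_eq' ro _ r _ rfl]
      conv_lhs => rw [← hla, ctaTail_eq' la _ l _ rfl, ← hra, ctaTail_eq' ra _ r _ rfl]
      rcases (by omega : lo.length ≤ l ∨ ro.length ≤ r) with hge | hge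
      · have hzl : (lo.zip la).drop l = [] := by
          rw [List.drop_eq_nil_iff]; simp [List.length_zip]; omega
        rw [hzl, List.drop_of_length_le hge, List.drop_of_length_le (by omega : la.length ≤ l)]
        simp only [pvMerge, Option.map_some, List.append_nil]
        rw [pvZipDrop, List.map_fst_zip (by simp; omega), List.map_snd_zip (by simp; omega)]
      · have hzr : (ro.zip ra).drop r = [] := by
          rw [List.drop_eq_nil_iff]; simp [List.length_zip]; omega
        rw [hzr, List.drop_of_length_le hge, List.drop_of_length_le (by omega : ra.length ≤ r),
            pvMerge_nil_right]
        simp only [Option.map_some, List.append_nil]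
        rw [pvZipDrop, List.map_fst_zip (by simp; omega), List.map_snd_zip (by simp; omega)]
    obtain ⟨hl, hr⟩ := hc
    have hzl : (lo.zip la).drop l = (lo[l], la[l]) :: (lo.zip la).drop (l+1) := by
      rw [List.drop_eq_getElem_cons (by simp [List.length_zip]; omega), List.getElem_zip]
    have hzr : (ro.zip ra).drop r = (ro[r], ra[r]) :: (ro.zip ra).drop (r+1) := by
      rw [List.drop_eq_getElem_cons (by simp [List.length_zip]; omega), List.getElem_zip]
    have glo := pyGetD_idx lo l hl
    have gro := pyGetD_idx ro r hr
    have gla := pyGetD_idx la l (by omega)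
    have gra := pyGetD_idx ra r (by omega)
    have glm : PySem.List.pyGetD lmins (l : Int) 0 = pvSM (la.drop l) := by
      rw [hlm, pyGetD_idx _ l (by simpa using hl)]
      simp
    have hsm : pvSM (((lo.zip la).drop l).map (·.2)) = pvSM (la.drop l) := by
      have : ((lo.zip la).drop l).map (·.2) = la.drop l := by
        rw [pvZipDrop]
        exact List.map_snd_zip (by simp; omega)
      rw [this]
    rw [ctaMerge, dif_pos (show l < lo.length ∧ r < ro.length from ⟨hl, hr⟩)]
    rw [hzl, hzr]
    simp only [pvMerge]
    by_cases h1 : lo[l] < ro[r]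
    · rw [if_pos (by rw [glo, gro]; exact h1), if_pos (show (lo[l], la[l]).1 < (ro[r], ra[r]).1 from h1)]
      rw [ih (l+1) r _ _ (by omega), ← hzr]
      cases hpm : pvMerge ((lo.zip la).drop (l+1)) ((ro.zip ra).drop r) <;>
        simp [glo, gla]
    · rw [if_neg (by rw [glo, gro]; exact h1), if_neg (show ¬ (lo[l], la[l]).1 < (ro[r], ra[r]).1 from h1)]
      by_cases h2 : pvSM (la.drop l) < ra[r]
      · rw [if_pos (by rw [gra, glm]; exact h2)]
        rw [if_pos (by rw [← hzl, hsm]; exact h2)]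
        rfl
      · rw [if_neg (by rw [gra, glm]; exact h2)]
        rw [if_neg (by rw [← hzl, hsm]; exact h2)]
        rw [ih l (r+1) _ _ (by omega), ← hzl]
        cases hpm : pvMerge ((lo.zip la).drop l) ((ro.zip ra).drop (r+1)) <;>
          simp [gro, gra]

theorem pvMerge_some_perm (L R : List (Int × Int)) :
    ∀ w, pvMerge L R = some w → w.Perm (L ++ R) := by
  induction L, R using pvMerge.induct with
  | case1 R => intro w h; simp [pvMerge] at h; simp [h.symm]
  | case2 p L => intro w h; simp [pvMerge] at h; simp [h.symm]
  | case3 p L q R h1 ih =>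
    intro w h
    rw [pvMerge, if_pos h1] at h
    cases hpm : pvMerge L (q :: R) with
    | none => rw [hpm] at h; simp at h
    | some w' =>
      rw [hpm] at h; simp at h
      rw [← h]
      exact List.Perm.cons p (ih w' hpm)
  | case4 p L q R h1 h2 => intro w h; rw [pvMerge, if_neg h1, if_pos h2] at h; simp at h
  | case5 p L q R h1 h2 ih =>
    intro w h
    rw [pvMerge, if_neg h1, if_neg h2] at h
    cases hpm : pvMerge (p :: L) R with
    | none => rw [hpm] at h; simp at h
    | some w' =>
      rw [hpm] at h; simp at h
      rw [← h]
      exact (List.Perm.cons q (ih w' hpm)).trans List.perm_middle.symm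

theorem pvMerge_some_sorted (L R : List (Int × Int)) :
    ∀ w, L.Pairwise (fun p q => p.1 ≤ q.1) → R.Pairwise (fun p q => p.1 ≤ q.1) →
      pvMerge L R = some w → w.Pairwise (fun p q => p.1 ≤ q.1) := by
  induction L, R using pvMerge.induct with
  | case1 R => intro w _ hR h; simp [pvMerge] at h; rwa [← h]
  | case2 p L => intro w hL _ h; simp [pvMerge] at h; rwa [← h]
  | case3 p L q R h1 ih =>
    intro w hL hR h
    rw [pvMerge, if_pos h1] at h
    cases hpm : pvMerge L (q :: R) with
    | none => rw [hpm] at h; simp at h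
    | some w' =>
      rw [hpm] at h; simp at h
      rw [← h]
      refine List.Pairwise.cons ?_ (ih w' hL.of_cons hR hpm)
      intro y hy
      have hy' : y ∈ L ++ q :: R := (pvMerge_some_perm L (q :: R) w' hpm).mem_iff.1 hy
      rcases List.mem_append.1 hy' with hyL | hyq
      · exact (List.pairwise_cons.1 hL).1 y hyL
      · rcases List.mem_cons.1 hyq with rfl | hyR
        · exact le_of_lt h1
        · exact le_of_lt (lt_of_lt_of_le h1 ((List.pairwise_cons.1 hR).1 y hyR))
  | case4 p L q R h1 h2 => intro w _ _ h; rw [pvMerge, if_neg h1, if_pos h2] at h; simp at h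
  | case5 p L q R h1 h2 ih =>
    intro w hL hR h
    rw [pvMerge, if_neg h1, if_neg h2] at h
    cases hpm : pvMerge (p :: L) R with
    | none => rw [hpm] at h; simp at h
    | some w' =>
      rw [hpm] at h; simp at h
      rw [← h]
      refine List.Pairwise.cons ?_ (ih w' hL hR.of_cons hpm)
      intro y hy
      have hy' : y ∈ (p :: L) ++ R := (pvMerge_some_perm (p :: L) R w' hpm).mem_iff.1 hy
      rcases List.mem_append.1 hy' with hyL | hyR
      · rcases List.mem_cons.1 hyL with rfl | hyL'
        · exact le_of_not_gt h1
        · exact le_trans (le_of_not_gt h1) ((List.pairwise_cons.1 hL).1 y hyL')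
      · exact (List.pairwise_cons.1 hR).1 y hyR

theorem pvMerge_eq_none_iff (L R : List (Int × Int)) :
    L.Pairwise (fun p q => p.1 ≤ q.1) → R.Pairwise (fun p q => p.1 ≤ q.1) →
    (∀ p ∈ L, p.2 ≤ 10^6) →
    (pvMerge L R = none ↔ ∃ p ∈ L, ∃ q ∈ R, q.1 ≤ p.1 ∧ p.2 < q.2) := by
  induction L, R using pvMerge.induct with
  | case1 R => intro _ _ _; simp [pvMerge]
  | case2 p L => intro _ _ _; simp [pvMerge]
  | case3 p L q R h1 ih =>
    intro hL hR hLv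
    rw [pvMerge, if_pos h1]
    rw [Option.map_eq_none_iff, ih hL.of_cons hR (fun x hx => hLv x (List.mem_cons_of_mem _ hx))]
    constructor
    · rintro ⟨p', hp', hq⟩; exact ⟨p', List.mem_cons_of_mem _ hp', hq⟩
    · rintro ⟨p', hp', q', hq', hle, hlt⟩
      rcases List.mem_cons.1 hp' with rfl | hp''
      · exfalso
        have : q.1 ≤ q'.1 := by
          rcases List.mem_cons.1 hq' with rfl | hq'' 
          · exact le_refl _
          · exact (List.pairwise_cons.1 hR).1 q' hq''
        omega
      · exact ⟨p', hp'', q', hq', hle, hlt⟩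
  | case4 p L q R h1 h2 =>
    intro hL hR hLv
    rw [pvMerge, if_neg h1, if_pos h2]
    simp only [true_iff]
    have hvals : ∀ x ∈ (p :: L).map (·.2), x ≤ 10^6 := by
      intro x hx
      rcases List.mem_map.1 hx with ⟨p', hp', rfl⟩
      exact hLv p' hp'
    rcases (pvSM_lt_iff _ _ hvals (by simp)).1 h2 with ⟨x, hx, hxlt⟩
    rcases List.mem_map.1 hx with ⟨p', hp', rfl⟩
    refine ⟨p', hp', q, List.mem_cons_self, ?_, hxlt⟩
    have : p.1 ≤ p'.1 := by
      rcases List.mem_cons.1 hp' with rfl | hp''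
      · exact le_refl _
      · exact (List.pairwise_cons.1 hL).1 p' hp''
    omega
  | case5 p L q R h1 h2 ih =>
    intro hL hR hLv
    rw [pvMerge, if_neg h1, if_neg h2]
    rw [Option.map_eq_none_iff, ih hL hR.of_cons hLv]
    constructor
    · rintro ⟨p', hp', q', hq', hle, hlt⟩
      exact ⟨p', hp', q', List.mem_cons_of_mem _ hq', hle, hlt⟩
    · rintro ⟨p', hp', q', hq', hle, hlt⟩
      rcases List.mem_cons.1 hq' with rfl | hq''
      · exfalso
        have hsm : q'.2 ≤ pvSM ((p :: L).map (·.2)) := le_of_not_gt h2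
        have : pvSM ((p :: L).map (·.2)) ≤ p'.2 :=
          pvSM_le_mem _ _ (List.mem_map.2 ⟨p', hp', rfl⟩)
        omega
      · exact ⟨p', hp', q', hq'', hle, hlt⟩

theorem pvZipTake (n : Nat) : ∀ (xs ys : List Int), (xs.zip ys).take n = (xs.take n).zip (ys.take n) := by
  induction n with
  | zero => intro xs ys; simp
  | succ m ih =>
    intro xs ys
    cases xs with
    | nil => simp
    | cons x xs =>
      cases ys with
      | nil => simp
      | cons y ys => simpa using ih xs ys

theorem pvGood_append (X Y : List (Int × Int)) :
    pvGood (X ++ Y) ↔ pvGood X ∧ pvGood Y ∧ ∀ p ∈ X, ∀ q ∈ Y, ¬(q.1 ≤ p.1 ∧ p.2 < q.2) :=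
  List.pairwise_append

theorem ctaMsort_char (fuel : Nat) : ∀ (o a : List Int), o.length = a.length → 1 ≤ o.length →
    o.length ≤ fuel → (∀ x ∈ a, x ≤ 10^6) →
    (ctaMsort fuel o a = none ↔ ¬ pvGood (o.zip a))
    ∧ ∀ p, ctaMsort fuel o a = some p → (p.1.zip p.2).Perm (o.zip a)
        ∧ p.1.Pairwise (· ≤ ·) ∧ p.1.length = o.length ∧ p.2.length = a.length := by
  induction fuel with
  | zero => intro o a _ h1 h2 _; omega
  | succ fuel ih =>
    intro o a hlen h1 hfuel hv
    by_cases hone : o.length = 1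
    · rw [ctaMsort, if_pos hone]
      constructor
      · simp only [reduceCtorEq, false_iff, not_not]
        rcases List.length_eq_one_iff.1 hone with ⟨x, rfl⟩
        rcases List.length_eq_one_iff.1 (hlen ▸ hone) with ⟨y, rfl⟩
        simp [pvGood]
      · rintro p hp
        injection hp with hp'
        rw [← hp']
        refine ⟨List.Perm.refl _, ?_, rfl, rfl⟩
        rcases List.length_eq_one_iff.1 hone with ⟨x, rfl⟩
        simp
    · have hm1 : 1 ≤ ((o.length + 1) / 2) := by omega
      have hm2 : ((o.length + 1) / 2) < o.length := by omega
      have hlt : (o.take ((o.length + 1) / 2)).length = ((o.length + 1) / 2) := by simp; omega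
      have hat : (a.take ((o.length + 1) / 2)).length = ((o.length + 1) / 2) := by simp; omega
      have hod : (o.drop ((o.length + 1) / 2)).length = o.length - ((o.length + 1) / 2) := by simp
      have had : (a.drop ((o.length + 1) / 2)).length = o.length - ((o.length + 1) / 2) := by simp; omega
      have ihL := ih (o.take ((o.length + 1) / 2)) (a.take ((o.length + 1) / 2)) (by omega) (by omega) (by omega)
        (fun x hx => hv x (List.mem_of_mem_take hx))
      have ihR := ih (o.drop ((o.length + 1) / 2)) (a.drop ((o.length + 1) / 2)) (by omega) (by omega) (by omega)
        (fun x hx => hv x (List.mem_of_mem_drop hx))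
      have hsplit : o.zip a = (o.take ((o.length + 1) / 2)).zip (a.take ((o.length + 1) / 2)) ++ (o.drop ((o.length + 1) / 2)).zip (a.drop ((o.length + 1) / 2)) := by
        rw [← pvZipTake, ← pvZipDrop, List.take_append_drop]
      cases hms1 : ctaMsort fuel (o.take ((o.length + 1) / 2)) (a.take ((o.length + 1) / 2)) with
      | none =>
        have heq : ctaMsort (fuel+1) o a = none := by
          rw [ctaMsort, if_neg hone]
          simp only [hms1]
        have hbad : ¬ pvGood ((o.take ((o.length + 1) / 2)).zip (a.take ((o.length + 1) / 2))) := (ihL.1).1 hms1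
        rw [heq]
        constructor
        · simp only [true_iff]
          rw [hsplit, pvGood_append]
          tauto
        · rintro p hp; exact absurd hp (by simp)
      | some pl =>
        obtain ⟨lo, la⟩ := pl
        obtain ⟨perm1, sort1, hlol, hlal⟩ := (ihL.2) (lo, la) hms1
        have good1 : pvGood ((o.take ((o.length + 1) / 2)).zip (a.take ((o.length + 1) / 2))) := by
          by_contra hg
          rw [← ihL.1] at hg
          rw [hms1] at hg
          exact absurd hg (by simp)
        cases hms2 : ctaMsort fuel (o.drop ((o.length + 1) / 2)) (a.drop ((o.length + 1) / 2)) with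
        | none =>
          have heq : ctaMsort (fuel+1) o a = none := by
            rw [ctaMsort, if_neg hone]
            simp only [hms1, hms2]
          have hbad : ¬ pvGood ((o.drop ((o.length + 1) / 2)).zip (a.drop ((o.length + 1) / 2))) := (ihR.1).1 hms2
          rw [heq]
          constructor
          · simp only [true_iff]
            rw [hsplit, pvGood_append]
            tauto
          · rintro p hp; exact absurd hp (by simp)
        | some pr =>
          obtain ⟨ro, ra⟩ := pr
          obtain ⟨perm2, sort2, hrol, hral⟩ := (ihR.2) (ro, ra) hms2
          have good2 : pvGood ((o.drop ((o.length + 1) / 2)).zip (a.drop ((o.length + 1) / 2))) := by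
            by_contra hg
            rw [← ihR.1] at hg
            rw [hms2] at hg
            exact absurd hg (by simp)
          simp only at perm1 sort1 hlol hlal perm2 sort2 hrol hral
          have hlol' : lo.length = ((o.length + 1) / 2) := by rw [hlol]; exact hlt
          have hlal' : la.length = ((o.length + 1) / 2) := by rw [hlal]; exact hat
          have hrol' : ro.length = o.length - ((o.length + 1) / 2) := by rw [hrol]; exact hod
          have hral' : ra.length = o.length - ((o.length + 1) / 2) := by rw [hral]; exact had
          have hlm : ctaLmins la ((o.length + 1) / 2) (10^6) [] = (List.range ((o.length + 1) / 2)).map (fun k => pvSM (la.drop k)) := by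
            have h0 := ctaLmins_eq la la.length (le_refl _) []
            rw [List.drop_length] at h0
            simp only [pvSM, List.foldr_nil, List.reverse_nil, List.append_nil] at h0
            rw [hlal'] at h0
            simpa [pvSM] using h0
          have heq : ctaMsort (fuel+1) o a
              = ctaMerge lo la ro ra (ctaLmins la ((o.length + 1) / 2) (10^6) []) ((o.length + 1) / 2) (o.length - ((o.length + 1) / 2)) 0 0 [] [] := by
            rw [ctaMsort, if_neg hone]
            simp only [hms1, hms2]
          rw [heq, ctaMerge_eq lo la ro ra _ ((o.length + 1) / 2) (o.length - ((o.length + 1) / 2)) hlol' hlal' hrol' hral' hlm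
              (((o.length + 1) / 2) + (o.length - ((o.length + 1) / 2))) 0 0 [] [] (by omega)]
          simp only [List.drop_zero, List.nil_append]
          have sortL : (lo.zip la).Pairwise (fun p q => p.1 ≤ q.1) := by
            have hfst : lo = (lo.zip la).map Prod.fst := (List.map_fst_zip (by omega)).symm
            rw [hfst] at sort1
            exact List.pairwise_map.1 sort1
          have sortR : (ro.zip ra).Pairwise (fun p q => p.1 ≤ q.1) := by
            have hfst : ro = (ro.zip ra).map Prod.fst := (List.map_fst_zip (by omega)).symm
            rw [hfst] at sort2
            exact List.pairwise_map.1 sort2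
          have valsL : ∀ p ∈ lo.zip la, p.2 ≤ 10^6 := by
            intro p hp
            have hp' : p ∈ (o.take ((o.length + 1) / 2)).zip (a.take ((o.length + 1) / 2)) := perm1.mem_iff.1 hp
            have hm : p.2 ∈ ((o.take ((o.length + 1) / 2)).zip (a.take ((o.length + 1) / 2))).map Prod.snd := List.mem_map_of_mem hp'
            rw [List.map_snd_zip (by omega)] at hm
            exact hv _ (List.mem_of_mem_take hm)
          constructor
          · rw [Option.map_eq_none_iff,
                pvMerge_eq_none_iff _ _ sortL sortR valsL, hsplit, pvGood_append]
            constructor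
            · rintro ⟨p, hp, q, hq, hle, hlt2⟩
              intro hgood
              exact hgood.2.2 p (perm1.mem_iff.1 hp) q (perm2.mem_iff.1 hq) ⟨hle, hlt2⟩
            · intro hbad
              push Not at hbad
              rcases hbad good1 good2 with ⟨p, hp, q, hq, hviol⟩
              exact ⟨p, perm1.mem_iff.2 hp, q, perm2.mem_iff.2 hq, hviol.1, hviol.2⟩
          · rintro p hp
            rw [Option.map_eq_some_iff] at hp
            rcases hp with ⟨w, hw, rfl⟩
            have permw : w.Perm ((lo.zip la) ++ (ro.zip ra)) := pvMerge_some_perm _ _ w hw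
            have sortw : w.Pairwise (fun p q => p.1 ≤ q.1) := pvMerge_some_sorted _ _ w sortL sortR hw
            have hwzip : ((w.map (·.1)).zip (w.map (·.2))) = w := (List.zip_of_prod rfl rfl).symm
            have hwlen : w.length = o.length := by
              have hl2 := permw.length_eq
              simp [List.length_append] at hl2
              omega
            refine ⟨?_, ?_, ?_, ?_⟩
            · show ((w.map (·.1)).zip (w.map (·.2))).Perm (o.zip a)
              rw [hwzip, hsplit]
              exact permw.trans (List.Perm.append perm1 perm2)
            · exact List.pairwise_map.2 sortw
            · simpa using hwlen
            · simp; omega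

theorem ctaMatch_length (a : List Int) :
    ∀ i ord occ ord', ctaMatch a i ord occ = some ord' → ord'.length = ord.length := by
  intro i
  induction i with
  | zero => intro ord occ ord' h; simp [ctaMatch] at h; rw [h]
  | succ j ih =>
    intro ord occ ord' h
    rw [ctaMatch] at h
    split at h
    · exact absurd h (by simp)
    · have := ih _ _ _ h
      rwa [PySem.List.pySetD_natCast, List.length_set] at this

theorem alt_check_iff (order a : List Int) (h : order.length = a.length) :
    ((PySem.List.pyRange 0 (a.length : Int) 1).all (fun j =>
      (PySem.List.pyRange 0 j 1).all (fun i =>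
        !(decide (PySem.List.pyGetD order i 0 ≥ PySem.List.pyGetD order j 0) &&
          decide (PySem.List.pyGetD a i 0 < PySem.List.pyGetD a j 0)))) = true)
    ↔ pvGood (order.zip a) := by
  rw [pvGood, List.pairwise_iff_getElem]
  simp only [List.all_eq_true, PySem.List.mem_pyRange_one, Bool.not_eq_eq_eq_not, Bool.not_true,
    Bool.and_eq_false_iff, decide_eq_false_iff_not, not_le, not_lt]
  have hzlen : (order.zip a).length = a.length := by simp [List.length_zip, h]
  constructor
  · intro hall i j hi hj hij
    rw [hzlen] at hi hj
    have hh := hall (j : Int) ⟨by omega, by omega⟩ (i : Int) ⟨by omega, by omega⟩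
    rw [pyGetD_idx order i (by omega), pyGetD_idx order j (by omega),
        pyGetD_idx a i (by omega), pyGetD_idx a j (by omega)] at hh
    rw [List.getElem_zip, List.getElem_zip]
    intro hc
    simp only at hc
    rcases hh with hlt | hle
    · omega
    · omega
  · intro hpw j hj i hi
    have hj' : j.toNat < a.length := by omega
    have hi' : i.toNat < j.toNat := by omega
    have hh := hpw i.toNat j.toNat (by omega) (by omega) (by omega)
    rw [List.getElem_zip, List.getElem_zip] at hh
    simp only at hh
    rw [show i = (i.toNat : Int) by omega, show j = (j.toNat : Int) by omega,
        pyGetD_idx order i.toNat (by omega), pyGetD_idx order j.toNat (by omega),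
        pyGetD_idx a i.toNat (by omega), pyGetD_idx a j.toNat (by omega)]
    by_contra hc
    push Not at hc
    exact hh ⟨by omega, by omega⟩

-- ===== VERDICT (by name: the statement is the Claim_ definition above) =====
theorem can_transform_array_spec : Claim_unchanged_can_transform_array := by
  intro a b _hdom hpre
  unfold Spec_can_transform_array
  intro hnd
  unfold D_can_transform_array at hnd
  cases hm : ctaMatch a a.length (List.replicate a.length 0) (ctaOcc b) with
  | none =>
    have hA : can_transform_array a b = false := by
      simp only [can_transform_array, hm]
    have hB : can_transform_array_alt a b = false := by
      simp only [can_transform_array_alt, hm]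
    rw [hA, hB]
  | some order =>
    have hol : order.length = a.length := by
      simpa using ctaMatch_length a a.length _ _ _ hm
    have h1 : 1 ≤ a.length := by
      cases a with
      | nil => exact absurd rfl hnd
      | cons x t => simp
    have hv : ∀ x ∈ a, x ≤ 10^6 := by
      intro x hx
      have := hpre x hx
      norm_num
      omega
    have hB : can_transform_array_alt a b
        = ((PySem.List.pyRange 0 (a.length : Int) 1).all (fun j =>
            (PySem.List.pyRange 0 j 1).all (fun i =>
              !(decide (PySem.List.pyGetD order i 0 ≥ PySem.List.pyGetD order j 0) &&
                decide (PySem.List.pyGetD a i 0 < PySem.List.pyGetD a j 0))))) := by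
      simp only [can_transform_array_alt, hm]
    have hc := ctaMsort_char (a.length + 1) order a (by omega) (by omega) (by omega) hv
    cases hms : ctaMsort (a.length + 1) order a with
    | none =>
      have hbad : ¬ pvGood (order.zip a) := (hc.1).1 hms
      have hA : can_transform_array a b = false := by
        simp only [can_transform_array, hm, hms]
      rw [hA, hB]
      symm
      rw [Bool.eq_false_iff]
      intro hall
      exact hbad ((alt_check_iff order a hol).1 hall)
    | some p =>
      have hgood : pvGood (order.zip a) := by
        by_contra hg
        rw [← hc.1] at hg
        rw [hms] at hg
        exact absurd hg (by simp)
      have hA : can_transform_array a b = true := by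
        simp only [can_transform_array, hm, hms]
      rw [hA, hB]
      symm
      exact (alt_check_iff order a hol).2 hgood

theorem can_transform_array_changed : Claim_changed_can_transform_array := by
  unfold Claim_changed_can_transform_array; decide

theorem can_transform_array_tight : Claim_exact_can_transform_array := by
  intro a b _hdom _hpre hd
  unfold D_can_transform_array at hd
  subst hd
  simp [can_transform_array, can_transform_array_alt, ctaMatch, ctaMsort,
    PySem.List.pyRange_one_eq_nil]
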